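-- pv_equiv track=rewrite | github.com/Arondiri/geunyang | Home/7.Sort Except Zero.py | except_zero
-- ===== SOURCE A (Python) =====
-- from typing import Iterable
--
-- def except_zero(items: list) -> Iterable:
--     A = []
--     B = []
--     for i in range(len(items)):
--         if items[i] == 0:
--             A.append(i)
--         else:
--             B.append(items[i])
--     B.sort()
--     C = []
--     c = 0
--     if len(A) == 0:
--         return B
--     else:
--         for i in range(len(A)):
--             C += B[c:A[i]-i]
--             C.append(0)
--             c = A[i]-i
--         C += B[c:]
--         return C
-- ===== SOURCE B (Python) =====
-- def except_zero(items: list):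
--     it = iter(sorted(x for x in items if x != 0))
--     return [0 if x == 0 else next(it) for x in items]
-- ===== Notes on version B (the rewrite author's own statement) =====
-- stated objective: simpler
-- what changed: B sorts the non-zero values once and rebuilds the list in one pass with an iterator, replacing A's zero-index list plus slice-offset reconstruction.
import Mathlib
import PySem

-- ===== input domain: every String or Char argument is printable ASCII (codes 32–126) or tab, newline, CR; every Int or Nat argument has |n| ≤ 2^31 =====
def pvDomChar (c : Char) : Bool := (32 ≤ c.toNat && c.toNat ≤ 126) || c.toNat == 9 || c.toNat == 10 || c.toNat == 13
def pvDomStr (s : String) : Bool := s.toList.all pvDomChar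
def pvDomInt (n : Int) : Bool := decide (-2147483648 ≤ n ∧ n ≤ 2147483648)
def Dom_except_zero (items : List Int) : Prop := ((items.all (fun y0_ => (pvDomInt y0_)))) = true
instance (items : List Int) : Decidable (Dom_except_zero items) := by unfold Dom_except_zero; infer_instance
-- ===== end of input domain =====

-- B replaces A's zero-index list and slice-offset reconstruction by a single-pass
-- iterator fill over the original list (objective: simpler). Return values only;
-- neither version mutates its argument.

-- ===== PORT A =====
def except_zero (items : List Int) : List Int :=
  -- for i in range(len(items)): A.append(i) / B.append(items[i])
  let ab := (PySem.List.pyRange 0 items.length 1).foldl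
    (fun (p : List Int × List Int) i =>
      if PySem.List.pyGetD items i 0 = 0 then (p.1 ++ [i], p.2)
      else (p.1, p.2 ++ [PySem.List.pyGetD items i 0])) ([], [])
  let zA := ab.1
  let zB := PySem.List.sorted ab.2 (fun x => x) false   -- B.sort()
  if zA.length = 0 then zB
  else
    -- for i in range(len(A)): C += B[c:A[i]-i]; C.append(0); c = A[i]-i
    let cc := (PySem.List.pyRange 0 zA.length 1).foldl
      (fun (p : List Int × Int) i =>
        (p.1 ++ PySem.List.slice zB (some p.2) (some (PySem.List.pyGetD zA i 0 - i)) ++ [0],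
         PySem.List.pyGetD zA i 0 - i)) ([], 0)
    cc.1 ++ PySem.List.slice zB (some cc.2) none        -- C += B[c:]

-- ===== PORT B =====
-- the comprehension '[0 if x == 0 else next(it) for x in items]' consuming the iterator
-- over the sorted non-zero values; the nz = [] branch on a non-zero x is unreachable
-- (nz holds exactly the non-zero elements of items)
def fillIter : List Int → List Int → List Int
  | [], _ => []
  | x :: rest, nz =>
    if x = 0 then 0 :: fillIter rest nz
    else match nz with
         | n :: ns => n :: fillIter rest ns
         | [] => []

def except_zero_alt (items : List Int) : List Int :=
  fillIter items (PySem.List.sorted (items.filter (fun x => x ≠ 0)) (fun x => x) false)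

-- ===== PRECONDITION & SPEC =====
def Spec_except_zero (items : List Int) (out : List Int) : Prop := out = except_zero_alt items
instance (items : List Int) (out : List Int) : Decidable (Spec_except_zero items out) := by unfold Spec_except_zero; infer_instance

-- ===== CLAIM (what is proved, stated in full; the proofs are below) =====
def Claim_equal_except_zero : Prop := ∀ (items : List Int), Dom_except_zero items → Spec_except_zero items (except_zero items)

-- ===== LEMMAS AND PROOFS =====

-- zero positions of items, positions starting at p
def zidxFrom : List Int → Int → List Int
  | [], _ => []
  | x :: r, p => if x = 0 then p :: zidxFrom r (p + 1) else zidxFrom r (p + 1)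

-- A's second loop as structural recursion over the zero-index list with counter i
def loopC (nz : List Int) : List Int → Int → (List Int × Int) → (List Int × Int)
  | [], _, acc => acc
  | z :: r, i, acc =>
      loopC nz r (i + 1)
        (acc.1 ++ PySem.List.slice nz (some acc.2) (some (z - i)) ++ [0], z - i)

-- generic: an index loop over range(k, len(xs)) folding on (i, xs[i]) is a fold over enumerate(drop k xs, k)
theorem foldl_pyRange_enum {β : Type} (xs : List Int) (f : β → Int → Int → β) :
    ∀ (t : List Int) (k : Nat) (acc : β), t = xs.drop k →
      (PySem.List.pyRange (k : Int) (xs.length : Int) 1).foldl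
        (fun acc i => f acc i (PySem.List.pyGetD xs i 0)) acc
      = (PySem.List.enumerate t (k : Int)).foldl (fun acc p => f acc p.1 p.2) acc := by
  intro t
  induction t with
  | nil =>
    intro k acc h
    have hk : xs.length ≤ k := by
      by_contra hlt
      have := List.drop_eq_nil_iff.mp h.symm
      omega
    rw [PySem.List.pyRange_one_eq_nil (by exact_mod_cast hk)]
    simp [PySem.List.enumerate]
  | cons x r ih =>
    intro k acc h
    have hk : k < xs.length := by
      by_contra hge
      rw [List.drop_eq_nil_iff.mpr (by omega)] at h
      simp at h
    rw [List.drop_eq_getElem_cons hk] at h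
    injection h with hx' hr
    have hx : xs.getD k 0 = x := by
      simp [List.getD, List.getElem?_eq_getElem hk, hx'.symm]
    rw [PySem.List.pyRange_one_cons (by exact_mod_cast hk)]
    simp only [List.foldl_cons, PySem.List.enumerate_cons]
    rw [PySem.List.pyGetD_natCast, hx]
    have : ((k : Int) + 1) = ((k + 1 : Nat) : Int) := by push_cast; ring
    rw [this, ih (k + 1) _ hr]

-- first loop: collects the zero positions and the non-zero values
theorem enumFold_ab :
    ∀ (t : List Int) (k : Nat) (u v : List Int),
      (PySem.List.enumerate t (k : Int)).foldl
        (fun (p : List Int × List Int) q =>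
          if q.2 = 0 then (p.1 ++ [q.1], p.2) else (p.1, p.2 ++ [q.2])) (u, v)
      = (u ++ zidxFrom t (k : Int), v ++ t.filter (fun x => x ≠ 0)) := by
  intro t
  induction t with
  | nil => intro k u v; simp [PySem.List.enumerate, zidxFrom]
  | cons x r ih =>
    intro k u v
    rw [PySem.List.enumerate_cons]
    simp only [List.foldl_cons, zidxFrom, List.filter_cons]
    have hk1 : ((k : Int) + 1) = ((k + 1 : Nat) : Int) := by push_cast; ring
    by_cases hx : x = 0
    · simp only [hx, ite_true]
      rw [hk1, ih (k + 1)]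
      simp
    · simp only [hx]
      rw [hk1, ih (k + 1)]
      simp [hx]

-- second loop: the pyRange fold is loopC
theorem enumFold_loopC (nz : List Int) :
    ∀ (t : List Int) (k : Nat) (acc : List Int × Int),
      (PySem.List.enumerate t (k : Int)).foldl
        (fun (p : List Int × Int) q =>
          (p.1 ++ PySem.List.slice nz (some p.2) (some (q.2 - q.1)) ++ [0], q.2 - q.1)) acc
      = loopC nz t (k : Int) acc := by
  intro t
  induction t with
  | nil => intro k acc; simp [PySem.List.enumerate, loopC]
  | cons z r ih =>
    intro k acc
    rw [PySem.List.enumerate_cons]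
    simp only [List.foldl_cons, loopC]
    have hk1 : ((k : Int) + 1) = ((k + 1 : Nat) : Int) := by push_cast; ring
    rw [hk1, ih (k + 1)]

-- the master invariant: A's reconstruction equals B's single-pass fill
theorem master (nz : List Int) :
    ∀ (items : List Int) (i c d : Nat) (C : List Int),
      nz.length = c + d + (items.filter (fun x => x ≠ 0)).length →
      (loopC nz (zidxFrom items ((i : Int) + c + d)) (i : Int) (C, (c : Int))).1
        ++ PySem.List.slice nz
             (some (loopC nz (zidxFrom items ((i : Int) + c + d)) (i : Int) (C, (c : Int))).2) none
      = C ++ PySem.List.slice nz (some (c : Int)) (some ((c : Int) + d))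
          ++ fillIter items (nz.drop (c + d)) := by
  intro items
  induction items with
  | nil =>
    intro i c d C h
    simp only [List.filter_nil, List.length_nil, Nat.add_zero] at h
    simp only [zidxFrom, loopC, fillIter]
    rw [PySem.List.slice_from_natCast]
    have hcd : ((c : Int) + d) = ((c + d : Nat) : Int) := by push_cast; ring
    rw [hcd, PySem.List.slice_natCast]
    simp
    omega
  | cons x rest ih =>
    intro i c d C h
    simp only [List.filter_cons] at h
    by_cases hx : x = 0
    · subst hx
      have hlen : nz.length = (c + d) + 0 + (rest.filter (fun x => x ≠ 0)).length := by
        rw [if_neg (by simp)] at h; omega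
      simp only [zidxFrom, loopC, fillIter, reduceIte]
      have hz : ((i : Int) + c + d) - i = ((c + d : Nat) : Int) := by push_cast; ring
      rw [hz]
      have hnext : (i : Int) + c + d + 1 = ((i + 1 : Nat) : Int) + ((c + d : Nat) : Int) + ((0 : Nat) : Int) := by
        push_cast; ring
      rw [hnext]
      have hi1 : ((i : Int) + 1) = ((i + 1 : Nat) : Int) := by push_cast; ring
      rw [hi1]
      rw [ih (i + 1) (c + d) 0 (C ++ PySem.List.slice nz (some (c : Int)) (some ((c + d : Nat) : Int)) ++ [0]) hlen]
      have hslice0 : PySem.List.slice nz (some ((c + d : Nat) : Int)) (some (((c + d : Nat) : Int) + ((0 : Nat) : Int))) = [] := by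
        rw [PySem.List.slice_natCast_add]; simp
      rw [hslice0]
      have hcast : ((c : Int) + (d : Int)) = ((c + d : Nat) : Int) := by push_cast; ring
      rw [hcast]
      simp
    · have hlen : nz.length = c + (d + 1) + (rest.filter (fun x => x ≠ 0)).length := by
        rw [if_pos (by simp [hx])] at h
        simp only [List.length_cons] at h; omega
      simp only [zidxFrom, fillIter, if_neg hx]
      have hnext : (i : Int) + c + d + 1 = ((i : Nat) : Int) + ((c : Nat) : Int) + ((d + 1 : Nat) : Int) := by
        push_cast; ring
      rw [hnext]
      rw [ih i c (d + 1) C hlen]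
      -- nz has an element at position c + d
      have hcd_lt : c + d < nz.length := by omega
      have hdrop : nz.drop (c + d) = nz[c + d] :: nz.drop (c + d + 1) := List.drop_eq_getElem_cons hcd_lt
      rw [hdrop]
      -- slice c (c+d+1) = slice c (c+d) ++ [nz[c+d]]
      have hsl : PySem.List.slice nz (some (c : Int)) (some ((c : Int) + ((d + 1 : Nat) : Int)))
          = PySem.List.slice nz (some (c : Int)) (some ((c : Int) + ((d : Nat) : Int))) ++ [nz[c + d]] := by
        rw [PySem.List.slice_natCast_add, PySem.List.slice_natCast_add]
        rw [List.take_add_one]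
        have hg : (nz.drop c)[d]? = some nz[c + d] := by
          rw [List.getElem?_drop]
          exact List.getElem?_eq_getElem hcd_lt
        simp [hg]
      rw [hsl]
      simp
      rw [← Nat.add_assoc]

-- the no-zero branch returns B directly, which is what loopC on [] gives too
theorem loopC_nil_case (nz : List Int) :
    (loopC nz [] 0 ([], 0)).1 ++ PySem.List.slice nz (some (loopC nz [] 0 ([], 0)).2) none = nz := by
  simp only [loopC]
  have : (0 : Int) = ((0 : Nat) : Int) := rfl
  rw [this, PySem.List.slice_from_natCast]
  simp

-- ===== VERDICT (by name: the statement is the Claim_ definition above) =====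
theorem except_zero_spec : Claim_equal_except_zero := by
  intro items _
  unfold Spec_except_zero except_zero except_zero_alt
  -- rewrite the first loop
  have h1 := foldl_pyRange_enum items
      (fun (p : List Int × List Int) (i v : Int) =>
        if v = 0 then (p.1 ++ [i], p.2) else (p.1, p.2 ++ [v])) items 0 ([], []) rfl
  simp only [Nat.cast_zero] at h1
  dsimp only
  have hab := enumFold_ab items 0 [] []
  simp only [Nat.cast_zero, List.nil_append] at hab
  rw [h1, hab]
  set nz := PySem.List.sorted (items.filter (fun x => x ≠ 0)) (fun x => x) false with hnz
  have hlen : nz.length = (items.filter (fun x => x ≠ 0)).length := by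
    rw [hnz]; exact (PySem.List.sorted_perm _ _ _).length_eq
  have hmaster := master nz items 0 0 0 [] (by simpa using hlen)
  simp only [Nat.cast_zero, Int.add_zero, Nat.add_zero, List.drop_zero, List.nil_append] at hmaster
  have hsl00 : PySem.List.slice nz (some (0 : Int)) (some (0 : Int)) = [] := by
    have : (0 : Int) = ((0 : Nat) : Int) := rfl
    rw [this, PySem.List.slice_natCast]; simp
  rw [hsl00, List.nil_append] at hmaster
  by_cases hz : (zidxFrom items 0).length = 0
  · rw [if_pos hz]
    have hznil : zidxFrom items 0 = [] := List.length_eq_zero_iff.mp hz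
    rw [hznil] at hmaster
    rw [loopC_nil_case nz] at hmaster
    exact hmaster
  · rw [if_neg hz]
    have h2 := foldl_pyRange_enum (zidxFrom items 0)
        (fun (p : List Int × Int) (i v : Int) =>
          (p.1 ++ PySem.List.slice nz (some p.2) (some (v - i)) ++ [0], v - i))
        (zidxFrom items 0) 0 ([], 0) rfl
    simp only [Nat.cast_zero] at h2
    have hlc := enumFold_loopC nz (zidxFrom items 0) 0 ([], 0)
    simp only [Nat.cast_zero] at hlc
    rw [h2, hlc]
    exact hmaster
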